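-- pv_equiv track=rewrite | github.com/CineInfini/Video_Quality_Auditor | cineinfini-v0_4_6/src/cineinfini/core/shot_registry.py | _find_scene_types
-- ===== SOURCE A (Python) =====
-- SCENE_TYPES = {
--     "interior": ["inside", "bedroom", "room", "office", "kitchen", "hall", "house"],
--     "exterior_nature": ["oak tree", "river", "field", "lake", "desert", "mountain", "bayou", "ocean"],
--     "exterior_urban": ["street", "sidewalk", "city", "highway", "road", "park"],
--     "vehicle": ["bus", "car", "cab", "truck", "helicopter", "boat"],
--     "institutional": ["school", "hospital", "church", "army", "principal", "football field"],
--     "crowd": ["crowd", "people", "followers", "protesters", "boarders"],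
--     "military": ["army", "vietnam", "platoon", "helicopter", "soldiers", "war", "firebase"],
-- }
--
-- def _find_scene_types(text_lower: str) -> list[str]:
--     hits = set()
--     for scene_type, keywords in SCENE_TYPES.items():
--         for kw in keywords:
--             if kw in text_lower:
--                 hits.add(scene_type)
--                 break
--     return sorted(hits)
-- ===== SOURCE B (Python) =====
-- # Inverted keyword index, written flat: each keyword maps to every scene
-- # category whose SCENE_TYPES list contains it ("army" and "helicopter"
-- # belong to two categories).  The lookup is then two staged passes:
-- # filter the matching keywords, flatten their categories into a set, sort.
-- _KEYWORD_INDEX = {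
--     "inside": ["interior"],
--     "bedroom": ["interior"],
--     "room": ["interior"],
--     "office": ["interior"],
--     "kitchen": ["interior"],
--     "hall": ["interior"],
--     "house": ["interior"],
--     "oak tree": ["exterior_nature"],
--     "river": ["exterior_nature"],
--     "field": ["exterior_nature"],
--     "lake": ["exterior_nature"],
--     "desert": ["exterior_nature"],
--     "mountain": ["exterior_nature"],
--     "bayou": ["exterior_nature"],
--     "ocean": ["exterior_nature"],
--     "street": ["exterior_urban"],
--     "sidewalk": ["exterior_urban"],
--     "city": ["exterior_urban"],
--     "highway": ["exterior_urban"],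
--     "road": ["exterior_urban"],
--     "park": ["exterior_urban"],
--     "bus": ["vehicle"],
--     "car": ["vehicle"],
--     "cab": ["vehicle"],
--     "truck": ["vehicle"],
--     "helicopter": ["vehicle", "military"],
--     "boat": ["vehicle"],
--     "school": ["institutional"],
--     "hospital": ["institutional"],
--     "church": ["institutional"],
--     "army": ["institutional", "military"],
--     "principal": ["institutional"],
--     "football field": ["institutional"],
--     "crowd": ["crowd"],
--     "people": ["crowd"],
--     "followers": ["crowd"],
--     "protesters": ["crowd"],
--     "boarders": ["crowd"],
--     "vietnam": ["military"],
--     "platoon": ["military"],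
--     "soldiers": ["military"],
--     "war": ["military"],
--     "firebase": ["military"],
-- }
--
--
-- def _find_scene_types(text_lower: str) -> list[str]:
--     matched = [cats for kw, cats in _KEYWORD_INDEX.items() if kw in text_lower]
--     return sorted({c for cats in matched for c in cats})
-- ===== Notes on version B (the rewrite author's own statement) =====
-- stated objective: alternative
-- what changed: B replaces A's per-category nested keyword loop with early break by a flat inverted keyword-to-categories index (keywords shared by two categories, e.g. 'army', map to both) scanned in staged passes: filter the matching keywords, flatten their category lists into a set, and sort it.
import Mathlib
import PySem

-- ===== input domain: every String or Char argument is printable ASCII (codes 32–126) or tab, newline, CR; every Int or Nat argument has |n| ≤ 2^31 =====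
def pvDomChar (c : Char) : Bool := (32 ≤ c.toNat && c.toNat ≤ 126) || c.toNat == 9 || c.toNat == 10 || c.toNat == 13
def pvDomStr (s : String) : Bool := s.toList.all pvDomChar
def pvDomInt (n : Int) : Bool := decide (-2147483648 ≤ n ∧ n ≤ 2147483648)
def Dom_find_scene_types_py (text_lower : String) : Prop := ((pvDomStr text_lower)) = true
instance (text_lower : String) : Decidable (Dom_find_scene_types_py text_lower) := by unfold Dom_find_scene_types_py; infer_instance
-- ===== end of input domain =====

-- B replaces A's per-category nested loop (inner break, set accumulator, final sort) by a flat
-- inverted keyword→categories table scanned in staged passes (filter, flatten, set, sort);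
-- objective: alternative.

-- ===== PORT A =====
def sceneTypes : List (String × List String) :=
  [("interior", ["inside", "bedroom", "room", "office", "kitchen", "hall", "house"]),
   ("exterior_nature", ["oak tree", "river", "field", "lake", "desert", "mountain", "bayou", "ocean"]),
   ("exterior_urban", ["street", "sidewalk", "city", "highway", "road", "park"]),
   ("vehicle", ["bus", "car", "cab", "truck", "helicopter", "boat"]),
   ("institutional", ["school", "hospital", "church", "army", "principal", "football field"]),
   ("crowd", ["crowd", "people", "followers", "protesters", "boarders"]),
   ("military", ["army", "vietnam", "platoon", "helicopter", "soldiers", "war", "firebase"])]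

-- inner 'for kw in keywords: if kw in text: hits.add(scene_type); break' = add once if some kw matches
def find_scene_types_py (text_lower : String) : List String :=
  let hits : PySem.Set String :=
    sceneTypes.foldl
      (fun hits p =>
        if p.2.any (fun kw => PySem.Str.isIn kw text_lower) then PySem.Set.add hits p.1
        else hits)
      PySem.Set.empty
  PySem.List.sorted hits (fun x => x) false

-- ===== PORT B =====
-- the literal module-level inverted index _KEYWORD_INDEX of Source B
def keywordIndex : List (String × List String) :=
  [("inside", ["interior"]),
   ("bedroom", ["interior"]),
   ("room", ["interior"]),
   ("office", ["interior"]),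
   ("kitchen", ["interior"]),
   ("hall", ["interior"]),
   ("house", ["interior"]),
   ("oak tree", ["exterior_nature"]),
   ("river", ["exterior_nature"]),
   ("field", ["exterior_nature"]),
   ("lake", ["exterior_nature"]),
   ("desert", ["exterior_nature"]),
   ("mountain", ["exterior_nature"]),
   ("bayou", ["exterior_nature"]),
   ("ocean", ["exterior_nature"]),
   ("street", ["exterior_urban"]),
   ("sidewalk", ["exterior_urban"]),
   ("city", ["exterior_urban"]),
   ("highway", ["exterior_urban"]),
   ("road", ["exterior_urban"]),
   ("park", ["exterior_urban"]),
   ("bus", ["vehicle"]),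
   ("car", ["vehicle"]),
   ("cab", ["vehicle"]),
   ("truck", ["vehicle"]),
   ("helicopter", ["vehicle", "military"]),
   ("boat", ["vehicle"]),
   ("school", ["institutional"]),
   ("hospital", ["institutional"]),
   ("church", ["institutional"]),
   ("army", ["institutional", "military"]),
   ("principal", ["institutional"]),
   ("football field", ["institutional"]),
   ("crowd", ["crowd"]),
   ("people", ["crowd"]),
   ("followers", ["crowd"]),
   ("protesters", ["crowd"]),
   ("boarders", ["crowd"]),
   ("vietnam", ["military"]),
   ("platoon", ["military"]),
   ("soldiers", ["military"]),
   ("war", ["military"]),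
   ("firebase", ["military"])]

-- matched = [cats for kw, cats in _KEYWORD_INDEX.items() if kw in text_lower]
-- return sorted({c for cats in matched for c in cats})
def find_scene_types_py_alt (text_lower : String) : List String :=
  let matched : List (String × List String) :=
    keywordIndex.filter (fun p => PySem.Str.isIn p.1 text_lower)
  PySem.List.sorted (PySem.Set.ofList (matched.flatMap (fun p => p.2))) (fun x => x) false

-- ===== PRECONDITION & SPEC =====
def Spec_find_scene_types_py (text_lower : String) (out : List String) : Prop := out = find_scene_types_py_alt text_lower
instance (text_lower : String) (out : List String) : Decidable (Spec_find_scene_types_py text_lower out) := by unfold Spec_find_scene_types_py; infer_instance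

-- ===== CLAIM (what is proved, stated in full; the proofs are below) =====
def Claim_equal_find_scene_types_py : Prop := ∀ (text_lower : String), Dom_find_scene_types_py text_lower → Spec_find_scene_types_py text_lower (find_scene_types_py text_lower)

-- ===== LEMMAS AND PROOFS =====

theorem pv_nodup_foldl {β : Type} (f : PySem.Set String → β → PySem.Set String)
    (hf : ∀ s x, s.Nodup → (f s x).Nodup) :
    ∀ (l : List β) (s : PySem.Set String), s.Nodup → (l.foldl f s).Nodup := by
  intro l
  induction l with
  | nil => intro s h; simpa using h
  | cons a l ih => intro s h; exact ih _ (hf s a h)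

theorem pv_memA (t c : String) :
    ∀ (L : List (String × List String)) (s0 : PySem.Set String),
    (c ∈ L.foldl
        (fun hits p =>
          if p.2.any (fun kw => PySem.Str.isIn kw t) then PySem.Set.add hits p.1 else hits)
        s0)
    ↔ c ∈ s0 ∨ ∃ p ∈ L, c = p.1 ∧ p.2.any (fun kw => PySem.Str.isIn kw t) = true := by
  intro L
  induction L with
  | nil => intro s0; simp
  | cons a L ih =>
      intro s0
      simp only [List.foldl_cons, ih, List.exists_mem_cons_iff]
      by_cases h : a.2.any (fun kw => PySem.Str.isIn kw t) = true
      · rw [if_pos h]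
        simp only [PySem.Set.mem_add, h, eq_self_iff_true, and_true]
        tauto
      · rw [if_neg h]
        tauto

theorem pv_memB (t c : String) :
    c ∈ (keywordIndex.filter (fun p => PySem.Str.isIn p.1 t)).flatMap (fun p => p.2)
    ↔ ∃ q ∈ keywordIndex, PySem.Str.isIn q.1 t = true ∧ c ∈ q.2 := by
  simp only [List.mem_flatMap, List.mem_filter]
  tauto

set_option maxHeartbeats 2000000 in
set_option maxRecDepth 10000 in
theorem pv_bridge (t c : String) :
    (∃ p ∈ sceneTypes, c = p.1 ∧ p.2.any (fun kw => PySem.Str.isIn kw t) = true)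
    ↔ (∃ q ∈ keywordIndex, PySem.Str.isIn q.1 t = true ∧ c ∈ q.2) := by
  constructor
  · rintro ⟨p, hp, hc, hany⟩
    subst hc
    rw [List.any_eq_true] at hany
    obtain ⟨kw, hkw, hin⟩ := hany
    simp only [sceneTypes, List.mem_cons, List.not_mem_nil, or_false] at hp
    rcases hp with rfl | rfl | rfl | rfl | rfl | rfl | rfl <;>
      simp only [List.mem_cons, List.not_mem_nil, or_false] at hkw <;>
      repeat' (first | (rcases hkw with rfl | hkw) | subst hkw)
    all_goals (simp [keywordIndex] <;> tauto)
  · rintro ⟨q, hq, hin, hc⟩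
    simp only [keywordIndex, List.mem_cons, List.not_mem_nil, or_false] at hq
    rcases hq with rfl | rfl | rfl | rfl | rfl | rfl | rfl | rfl | rfl | rfl | rfl | rfl | rfl | rfl | rfl | rfl | rfl | rfl | rfl | rfl | rfl | rfl | rfl | rfl | rfl | rfl | rfl | rfl | rfl | rfl | rfl | rfl | rfl | rfl | rfl | rfl | rfl | rfl | rfl | rfl | rfl | rfl | rfl <;>
      simp only [List.mem_cons, List.not_mem_nil, or_false] at hc <;>
      repeat' (first | (rcases hc with rfl | hc) | subst hc)
    all_goals (simp [sceneTypes] <;> tauto)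

-- ===== VERDICT (by name: the statement is the Claim_ definition above) =====
set_option maxHeartbeats 1000000 in
theorem find_scene_types_py_spec : Claim_equal_find_scene_types_py := by
  intro t _
  unfold Spec_find_scene_types_py
  simp only [find_scene_types_py, find_scene_types_py_alt]
  rw [PySem.List.sorted_id_eq_sorted_id_iff_perm]
  have hA : (sceneTypes.foldl
      (fun hits p =>
        if p.2.any (fun kw => PySem.Str.isIn kw t) then PySem.Set.add hits p.1 else hits)
      PySem.Set.empty).Nodup := by
    apply pv_nodup_foldl _ _ _ _ List.nodup_nil
    intro s x h; dsimp only; split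
    · exact PySem.Set.nodup_add _ _ h
    · exact h
  have hB : (PySem.Set.ofList
      ((keywordIndex.filter (fun p => PySem.Str.isIn p.1 t)).flatMap (fun p => p.2))).Nodup :=
    PySem.Set.nodup_ofList _
  rw [List.perm_ext_iff_of_nodup hA hB]
  intro c
  rw [pv_memA, PySem.Set.mem_ofList, pv_memB]
  simp only [PySem.Set.empty, List.not_mem_nil, false_or]
  exact pv_bridge t c
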